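-- pv_equiv track=rewrite | github.com/Mochacina/Algorithm | programmers/pro135808 과일 장수.py | solution
-- ===== SOURCE A (Python) =====
-- def solution(k, m, score):
--     answer = 0
--     l = sorted(score)
--     while len(l)>=m:
--         l2 =[]
--         for _ in range(m):
--             l2.append(l.pop())
--         answer += min(l2)*len(l2)
--     return answer
-- ===== SOURCE B (Python) =====
-- def solution(k, m, score):
--     s = sorted(score)
--     n = len(s)
--     return sum(s[n - g * m] * m for g in range(1, n // m + 1))
-- ===== Notes on version B (the rewrite author's own statement) =====
-- stated objective: simpler
-- what changed: Replaces the destructive while-loop that pops m-element baskets off a temp list and takes min() of each with a direct closed-form sum over the sorted list: the minimum of the g-th top basket sits at index n - g*m, so B sums s[n-g*m]*m for g in 1..n//m with no mutation, no inner loop and no min().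
import Mathlib
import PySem

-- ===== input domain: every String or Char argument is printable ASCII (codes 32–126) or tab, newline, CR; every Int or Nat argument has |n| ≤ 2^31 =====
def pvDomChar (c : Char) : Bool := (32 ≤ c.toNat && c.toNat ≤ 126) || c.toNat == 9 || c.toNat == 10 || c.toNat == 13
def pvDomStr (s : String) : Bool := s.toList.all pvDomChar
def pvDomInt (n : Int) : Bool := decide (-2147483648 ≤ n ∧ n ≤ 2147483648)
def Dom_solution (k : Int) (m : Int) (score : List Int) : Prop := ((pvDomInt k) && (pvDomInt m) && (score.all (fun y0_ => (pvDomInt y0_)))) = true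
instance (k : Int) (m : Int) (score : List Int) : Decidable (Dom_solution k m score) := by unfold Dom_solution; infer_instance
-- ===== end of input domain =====

-- B replaces A's destructive pop-m-then-min while-loop by a closed-form sum over the
-- sorted list (basket minima sit at stride-m indices); objective: simpler, same cost.


-- ===== PORT A =====
-- 'for _ in range(m): l2.append(l.pop())' — state is (l, l2); pop? none = IndexError
-- (unreachable under the while guard len(l) >= m with m >= 1).
def popLoopA : Nat → List Int × List Int → List Int × List Int
  | 0, st => st
  | n+1, (l, l2) =>
    match PySem.List.pop? l (-1) with
    | none => (l, l2)
    | some (x, l') => popLoopA n (l', l2 ++ [x])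

-- 'while len(l) >= m: …' — fuel bounds the iteration count (each pass with m >= 1
-- strictly shortens l); 'min([])' raises ValueError in Python (only when m <= 0,
-- excluded by Pre_), modelled by min? = none returning the accumulator.
def whileLoopA (m : Int) : Nat → List Int → Int → Int
  | 0, _, answer => answer
  | fuel+1, l, answer =>
    if m ≤ (l.length : Int) then
      match popLoopA m.toNat (l, []) with
      | (l', l2) =>
        match PySem.List.min? l2 (fun x => x) with
        | none => answer
        | some mn => whileLoopA m fuel l' (answer + mn * (l2.length : Int))
    else answer

def solution (k : Int) (m : Int) (score : List Int) : Int :=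
  whileLoopA m (score.length + 1) (PySem.List.sorted score (fun x => x) false) 0

-- ===== PORT B =====
def solution_alt (k : Int) (m : Int) (score : List Int) : Int :=
  let s := PySem.List.sorted score (fun x => x) false
  let n : Int := (s.length : Int)
  (PySem.List.pyRange 1 (PySem.Int.floordiv n m + 1) 1).foldl
    (fun acc g => acc + PySem.List.pyGetD s (n - g * m) 0 * m) 0

-- ===== PRECONDITION & SPEC =====
-- A raises for every m <= 0 (min() of an empty basket: range(m) is empty while
-- len(l) >= m holds forever); B raises ZeroDivisionError at m = 0. Excluded here.
def Pre_solution (k : Int) (m : Int) (score : List Int) : Prop := 1 ≤ m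
instance (k : Int) (m : Int) (score : List Int) : Decidable (Pre_solution k m score) := by unfold Pre_solution; infer_instance
def pvWitness_solution : Int × Int × List Int := (4, 2, [1, 2, 3, 1])

def Spec_solution (k : Int) (m : Int) (score : List Int) (out : Int) : Prop := out = solution_alt k m score
instance (k : Int) (m : Int) (score : List Int) (out : Int) : Decidable (Spec_solution k m score out) := by unfold Spec_solution; infer_instance

-- ===== CLAIM (what is proved, stated in full; the proofs are below) =====
def Claim_equal_solution : Prop := ∀ (k : Int) (m : Int) (score : List Int), Dom_solution k m score → Pre_solution k m score → Spec_solution k m score (solution k m score)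

-- ===== LEMMAS AND PROOFS =====

-- Common reference value: the basket sum, peeling the top basket (its minimum is the
-- element at index len - m of the remaining sorted list) and recursing on the prefix.
def basketSum (m : Int) : Nat → List Int → Int
  | 0, _ => 0
  | b+1, l => PySem.List.pyGetD l ((l.length : Int) - m) 0 * m
              + basketSum m b (l.take (l.length - m.toNat))

-- A's inner for-loop pops the last n elements: it splits l at length - n.
theorem popLoopA_eq (n : Nat) : ∀ (l acc : List Int), n ≤ l.length →
    popLoopA n (l, acc) = (l.take (l.length - n), acc ++ (l.drop (l.length - n)).reverse) := by
  induction n with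
  | zero => intro l acc _; simp [popLoopA]
  | succ n ih =>
    intro l acc h
    rcases l.eq_nil_or_concat with rfl | ⟨xs, x, rfl⟩
    all_goals simp only [List.concat_eq_append] at *
    · simp at h
    · rw [popLoopA, PySem.List.pop?_last]
      dsimp only
      have hxs : xs.length + 1 - (n+1) ≤ xs.length := by omega
      rw [ih _ _ (by simp at h ⊢; omega)]
      have hL : (xs ++ [x]).length - (n + 1) = xs.length - n := by simp
      have h1 := List.take_append_of_le_length (l₁ := xs) (l₂ := [x]) (i := xs.length - n) (by omega)
      have h2 := List.drop_append_of_le_length (l₁ := xs) (l₂ := [x]) (i := xs.length - n) (by omega)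
      rw [hL, h1, h2]
      simp

-- Python's min() of the reversed j-suffix of a sorted list is the element at index j.
theorem min_of_suffix (l : List Int) (hp : l.Pairwise (· ≤ ·)) (j : Nat) (hj : j < l.length) :
    PySem.List.min? ((l.drop j).reverse) (fun x => x) = some (l[j]) := by
  have hne : (l.drop j).reverse ≠ [] := by
    simp [List.drop_eq_nil_iff]; omega
  obtain ⟨v, hv⟩ : ∃ v, PySem.List.min? ((l.drop j).reverse) (fun x => x) = some v := by
    rcases hmn : PySem.List.min? ((l.drop j).reverse) (fun x => x) with _ | v
    · exact absurd ((PySem.List.min?_eq_none_iff _ _).mp hmn) hne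
    · exact ⟨v, rfl⟩
  have hmem : v ∈ (l.drop j).reverse := PySem.List.min?_mem hv
  have hmin : ∀ y ∈ (l.drop j).reverse, v ≤ y := PySem.List.min?_isMin hv
  have hpair := List.pairwise_iff_getElem.mp hp
  have hbelow : ∀ y ∈ (l.drop j).reverse, l[j] ≤ y := by
    intro y hy
    rw [List.mem_reverse] at hy
    obtain ⟨i, hi, rfl⟩ := List.mem_iff_getElem.mp hy
    rw [List.getElem_drop]
    rcases Nat.eq_zero_or_pos i with rfl | hpos
    · simp only [Nat.add_zero]; exact le_refl _
    · exact hpair j (j+i) hj (by simp at hi; omega) (by omega)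
  have h1 : l[j] ∈ (l.drop j).reverse := by
    rw [List.mem_reverse]
    have : (l.drop j)[0]'(by simp; omega) = l[j] := by
      rw [List.getElem_drop]
      congr 1
    rw [← this]; exact List.getElem_mem _
  rw [hv]
  exact congrArg some (le_antisymm (hmin _ h1) (hbelow _ hmem))

-- A's while loop computes the basket sum.
theorem whileLoopA_eq (m : Int) (hm : 1 ≤ m) : ∀ (fuel : Nat) (l : List Int) (answer : Int),
    l.Pairwise (· ≤ ·) → l.length ≤ fuel →
    whileLoopA m fuel l answer = answer + basketSum m (l.length / m.toNat) l := by
  have hmt : 1 ≤ m.toNat := by omega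
  intro fuel
  induction fuel with
  | zero =>
    intro l answer hp hf
    have : l = [] := by cases l <;> simp_all
    subst this
    simp [whileLoopA, basketSum]
  | succ fuel ih =>
    intro l answer hp hf
    rw [whileLoopA]
    by_cases hc : m ≤ (l.length : Int)
    · rw [if_pos hc]
      have hmtl : m.toNat ≤ l.length := by omega
      rw [popLoopA_eq m.toNat l [] hmtl]
      dsimp only
      have hj : l.length - m.toNat < l.length := by omega
      rw [List.nil_append, min_of_suffix l hp _ hj]
      have hlen2 : ((l.drop (l.length - m.toNat)).reverse.length : Int) = m := by
        simp; omega
      rw [hlen2]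
      dsimp only
      have hp' : (l.take (l.length - m.toNat)).Pairwise (· ≤ ·) :=
        hp.sublist (List.take_sublist _ _)
      have hf' : (l.take (l.length - m.toNat)).length ≤ fuel := by simp; omega
      rw [ih _ _ hp' hf']
      have hdiv : l.length / m.toNat = (l.length - m.toNat) / m.toNat + 1 := by
        have h1 : l.length = (l.length - m.toNat) + m.toNat := by omega
        rw [h1, Nat.add_div_right _ (by omega)]
        simp
      rw [hdiv, basketSum]
      have hidx : PySem.List.pyGetD l ((l.length : Int) - m) 0 = l[l.length - m.toNat]'hj := by
        rw [PySem.List.pyGetD_eq_getElem l (i := (l.length : Int) - m) 0 (by omega) (by omega)]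
        congr 1
        omega
      have hlen3 : (l.take (l.length - m.toNat)).length = l.length - m.toNat := by simp
      rw [hidx, hlen3]
      ring
    · rw [if_neg hc]
      have : l.length / m.toNat = 0 := Nat.div_eq_of_lt (by omega)
      rw [this, basketSum]
      omega

theorem pyGetD_take (l : List Int) (t : Nat) (i : Int) (h0 : 0 ≤ i) (h1 : i < (t : Int))
    (h2 : t ≤ l.length) : PySem.List.pyGetD (l.take t) i 0 = PySem.List.pyGetD l i 0 := by
  rw [PySem.List.pyGetD_eq_getElem _ 0 h0 (by simp; omega),
      PySem.List.pyGetD_eq_getElem _ 0 h0 (by omega)]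
  exact List.getElem_take

-- Shifting B's basket index by one basket moves from l to its top-basket-free prefix.
theorem elem_shift (m : Int) (hm : 1 ≤ m) (l : List Int) (g : Int) (hg1 : 1 ≤ g)
    (hgle : (g+1)*m ≤ (l.length : Int)) :
    PySem.List.pyGetD (l.take (l.length - m.toNat))
      (((l.take (l.length - m.toNat)).length : Int) - g*m) 0
    = PySem.List.pyGetD l ((l.length : Int) - (g+1)*m) 0 := by
  have hmc : (m.toNat : Int) = m := by omega
  have h2m : 2*m ≤ (g+1)*m := by nlinarith
  have hmtl : m.toNat ≤ l.length := by omega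
  have hlen' : (l.take (l.length - m.toNat)).length = l.length - m.toNat := by simp
  have htc : (((l.length - m.toNat : Nat)) : Int) = (l.length : Int) - m := by
    omega
  have hi : ((l.take (l.length - m.toNat)).length : Int) - g*m
      = (l.length:Int) - (g+1)*m := by
    rw [hlen', htc]; ring
  rw [hi]
  exact pyGetD_take l _ _ (by linarith) (by rw [htc]; nlinarith) (by omega)

-- B's generator sum computes the basket sum.
theorem alt_eq (m : Int) (hm : 1 ≤ m) : ∀ (b : Nat) (l : List Int), b = l.length / m.toNat →
    (PySem.List.pyRange 1 ((b : Int) + 1) 1).foldl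
      (fun acc g => acc + PySem.List.pyGetD l ((l.length : Int) - g * m) 0 * m) 0
    = basketSum m b l := by
  have hmt : 1 ≤ m.toNat := by omega
  have hmc : (m.toNat : Int) = m := by omega
  intro b
  induction b with
  | zero =>
    intro l hb
    rw [show ((0:Nat):Int) + 1 = 1 by norm_num, PySem.List.pyRange_one_eq_nil (by norm_num)]
    simp [basketSum]
  | succ b ih =>
    intro l hb
    have hble : (b+1) * m.toNat ≤ l.length :=
      (Nat.le_div_iff_mul_le (by omega)).mp (hb ▸ le_refl _)
    have hbleZ : ((b:Int)+1) * m ≤ (l.length : Int) := by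
      calc ((b:Int)+1) * m = (((b+1) * m.toNat : Nat) : Int) := by push_cast [hmc]; ring
      _ ≤ (l.length : Int) := by exact_mod_cast hble
    rw [PySem.List.foldl_add, PySem.List.pyRange_one_cons (by push_cast; nlinarith)]
    rw [List.map_cons, List.sum_cons, zero_add]
    set l' := l.take (l.length - m.toNat) with hl'
    have hlen' : l'.length = l.length - m.toNat := by simp [hl']
    have hb' : b = l'.length / m.toNat := by
      rw [hlen']
      have hmtl : m.toNat ≤ l.length := le_trans (Nat.le_mul_of_pos_left _ (by omega)) hble
      have h1 : l.length - m.toNat + m.toNat = l.length := by omega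
      have h2 := Nat.add_div_right (l.length - m.toNat) (show 0 < m.toNat by omega)
      rw [h1] at h2
      omega
    have key : ((PySem.List.pyRange (1+1) (((b:Nat):Int)+1+1) 1).map
          (fun g => PySem.List.pyGetD l ((l.length : Int) - g * m) 0 * m)).sum
        = ((PySem.List.pyRange 1 (((b:Nat):Int)+1) 1).map
          (fun g => PySem.List.pyGetD l' ((l'.length : Int) - g * m) 0 * m)).sum := by
      rw [PySem.List.pyRange_one, PySem.List.pyRange_one]
      have e1 : (((b:Nat):Int)+1+1-(1+1)).toNat = b := by omega
      have e2 : (((b:Nat):Int)+1-1).toNat = b := by omega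
      rw [e1, e2, List.map_map, List.map_map]
      congr 1
      apply List.map_congr_left
      intro a ha
      have hab : a < b := List.mem_range.mp ha
      simp only [Function.comp_apply]
      have hsh := elem_shift m hm l (1 + (a:Int)) (by omega)
        (by
          have : (1 + (a:Int) + 1) * m ≤ ((b:Int)+1) * m := by nlinarith [(by omega : (a:Int) < (b:Int))]
          linarith)
      rw [← hl'] at hsh
      rw [hsh]
      congr 2
      ring
    have ih' := ih l' hb'
    rw [PySem.List.foldl_add, zero_add] at ih'
    rw [show (((b+1:Nat)):Int) + 1 = ((b:Nat):Int)+1+1 by push_cast; ring]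
    rw [key, ih', one_mul, basketSum, ← hl']

-- ===== VERDICT (by name: the statement is the Claim_ definition above) =====
theorem solution_spec : Claim_equal_solution := by
  intro k m score _ hm
  unfold Pre_solution at hm
  unfold Spec_solution solution solution_alt
  dsimp only
  have hpair : (PySem.List.sorted score (fun x => x) false).Pairwise (· ≤ ·) :=
    PySem.List.sorted_pairwise score (fun x => x)
  have hlen : (PySem.List.sorted score (fun x => x) false).length = score.length :=
    (PySem.List.sorted_perm score (fun x => x) false).length_eq
  have hfd : PySem.Int.floordiv ((PySem.List.sorted score (fun x => x) false).length : Int) m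
      = (((PySem.List.sorted score (fun x => x) false).length / m.toNat : Nat) : Int) := by
    have hm' : m = ((m.toNat : Nat) : Int) := by omega
    calc PySem.Int.floordiv ((PySem.List.sorted score (fun x => x) false).length : Int) m
        = PySem.Int.floordiv ((PySem.List.sorted score (fun x => x) false).length : Int)
            ((m.toNat : Nat) : Int) := by rw [← hm']
      _ = (((PySem.List.sorted score (fun x => x) false).length / m.toNat : Nat) : Int) :=
          PySem.Int.floordiv_natCast _ _
  rw [whileLoopA_eq m hm (score.length + 1) _ 0 hpair (by omega), hfd,
      alt_eq m hm _ _ rfl, zero_add]
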